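-- pv_equiv track=rewrite | github.com/dxli/nurbsfit | trim_meshes.py | find_border
-- ===== SOURCE A (Python) =====
-- def find_border(edges):
--     from collections import defaultdict
--
--     # Build adjacency list
--     adj_list = defaultdict(list)
--     for a, b in edges:
--         adj_list[a].append(b)
--         adj_list[b].append(a)
--
--     # Start from any vertex
--     start_vertex = edges[0][0]  # Start with the first vertex of the first edge
--     visited = set()
--     border = []
--     current = start_vertex
--     prev = None
--
--     # Traverse the edges to find the border
--     while current is not None:
--         border.append(current)
--         visited.add(current)
--         next_vertex = None
--         for neighbor in adj_list[current]:
--             if neighbor != prev and neighbor not in visited: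
--                 next_vertex = neighbor
--                 break
--         prev = current
--         current = next_vertex
--
--         if current == start_vertex:  # Close the loop
--             break
--
--     return border
-- ===== SOURCE B (Python) =====
-- def find_border(edges):
--     # Same traversal, but no adjacency dict: the next vertex is found by a
--     # direct in-order scan of `edges` (edge (a,b) offers b when a==current,
--     # then a when b==current), which matches the adjacency append order.
--     start_vertex = edges[0][0]
--     visited = set()
--     border = []
--     current = start_vertex
--     prev = None
--     while current is not None:
--         border.append(current)
--         visited.add(current)
--         next_vertex = None
--         for a, b in edges:
--             if a == current and b != prev and b not in visited:
--                 next_vertex = b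
--                 break
--             if b == current and a != prev and a not in visited:
--                 next_vertex = a
--                 break
--         prev = current
--         current = next_vertex
--         if current == start_vertex:
--             break
--     return border
-- ===== Notes on version B (the rewrite author's own statement) =====
-- stated objective: simpler
-- what changed: B drops the defaultdict adjacency-list build entirely and finds the next vertex by scanning the edge list directly in order (edge (a,b) offers b when a==current, then a when b==current), which reproduces A's adjacency append order without the dict.
import Mathlib
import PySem

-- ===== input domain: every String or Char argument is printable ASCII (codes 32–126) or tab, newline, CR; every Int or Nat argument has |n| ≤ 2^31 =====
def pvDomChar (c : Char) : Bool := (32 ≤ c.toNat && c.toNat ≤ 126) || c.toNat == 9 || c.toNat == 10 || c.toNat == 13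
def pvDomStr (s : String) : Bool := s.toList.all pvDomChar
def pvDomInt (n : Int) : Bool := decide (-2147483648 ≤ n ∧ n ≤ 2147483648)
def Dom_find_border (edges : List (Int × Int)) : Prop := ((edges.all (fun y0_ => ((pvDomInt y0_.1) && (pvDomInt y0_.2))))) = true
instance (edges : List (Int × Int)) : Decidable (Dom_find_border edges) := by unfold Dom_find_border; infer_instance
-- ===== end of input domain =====

-- B replaces A's defaultdict adjacency build by a direct in-order scan of the
-- edge list for the next vertex (objective: simpler — no dict is built).

-- ===== PORT A =====
-- adjacency build: for (a,b) in edges: adj[a].append(b); adj[b].append(a)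
def buildAdj (edges : List (Int × Int)) : PySem.Dict Int (List Int) :=
  edges.foldl (fun d p => (d.modify p.1 [] (· ++ [p.2])).modify p.2 [] (· ++ [p.1]))
    PySem.Dict.empty

-- the while loop: fuel 2*|edges|+1 bounds the iterations (each appends a new vertex)
def loopA (adj : PySem.Dict Int (List Int)) (start : Int) :
    Nat → Option Int → Option Int → PySem.Set Int → List Int → List Int
  | 0, _, _, _, border => border
  | _ + 1, none, _, _, border => border
  | fuel + 1, some cur, prev, visited, border =>
    let border := border ++ [cur]
    let visited := PySem.Set.add visited cur
    let next := (adj.getD cur []).find?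
      (fun n => decide (some n ≠ prev) && !(PySem.Set.contains visited n))
    if next = some start then border
    else loopA adj start fuel next (some cur) visited border

def find_border (edges : List (Int × Int)) : List Int :=
  let adj := buildAdj edges
  let start := (PySem.List.pyGetD edges 0 (0, 0)).1
  loopA adj start (2 * edges.length + 1) (some start) none PySem.Set.empty []

-- ===== PORT B =====
-- the inner 'for a, b in edges' scan with two breaks
def scanNext (prev : Option Int) (visited : PySem.Set Int) (cur : Int) :
    List (Int × Int) → Option Int
  | [] => none
  | (a, b) :: rest =>
    if a = cur ∧ (decide (some b ≠ prev) && !(PySem.Set.contains visited b)) = true then some b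
    else if b = cur ∧ (decide (some a ≠ prev) && !(PySem.Set.contains visited a)) = true then some a
    else scanNext prev visited cur rest

def loopB (edges : List (Int × Int)) (start : Int) :
    Nat → Option Int → Option Int → PySem.Set Int → List Int → List Int
  | 0, _, _, _, border => border
  | _ + 1, none, _, _, border => border
  | fuel + 1, some cur, prev, visited, border =>
    let border := border ++ [cur]
    let visited := PySem.Set.add visited cur
    let next := scanNext prev visited cur edges
    if next = some start then border
    else loopB edges start fuel next (some cur) visited border

def find_border_alt (edges : List (Int × Int)) : List Int :=
  let start := (PySem.List.pyGetD edges 0 (0, 0)).1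
  loopB edges start (2 * edges.length + 1) (some start) none PySem.Set.empty []

-- ===== PRECONDITION & SPEC =====
-- A raises IndexError on edges == [] (edges[0]); B raises there too.
def Pre_find_border (edges : List (Int × Int)) : Prop := edges ≠ []
instance (edges : List (Int × Int)) : Decidable (Pre_find_border edges) := by
  unfold Pre_find_border; infer_instance
def pvWitness_find_border : (List (Int × Int)) := [(1, 2), (2, 3), (3, 1)]
def Spec_find_border (edges : List (Int × Int)) (out : List Int) : Prop := out = find_border_alt edges
instance (edges : List (Int × Int)) (out : List Int) : Decidable (Spec_find_border edges out) := by
  unfold Spec_find_border; infer_instance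

-- ===== CLAIM (what is proved, stated in full; the proofs are below) =====
def Claim_equal_find_border : Prop := ∀ (edges : List (Int × Int)), Dom_find_border edges → Pre_find_border edges → Spec_find_border edges (find_border edges)

-- ===== LEMMAS AND PROOFS =====

-- the neighbours of v, in the order A's dict build appends them
def nbrs (edges : List (Int × Int)) (v : Int) : List Int :=
  edges.flatMap (fun p => (if p.1 = v then [p.2] else []) ++ (if p.2 = v then [p.1] else []))

theorem getD_buildAdj_aux (es : List (Int × Int)) (d : PySem.Dict Int (List Int)) (v : Int) :
    (es.foldl (fun d p => (d.modify p.1 [] (· ++ [p.2])).modify p.2 [] (· ++ [p.1])) d).getD v []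
      = d.getD v [] ++ nbrs es v := by
  induction es generalizing d with
  | nil => simp [nbrs]
  | cons p rest ih =>
    obtain ⟨a, b⟩ := p
    simp only [List.foldl_cons, ih, nbrs, List.flatMap_cons]
    rw [PySem.Dict.getD_modify, PySem.Dict.getD_modify]
    by_cases hva : v = a <;> by_cases hvb : v = b <;>
      simp [hva, hvb, eq_comm, PySem.Dict.getD_modify, List.append_assoc] <;>
        by_cases hab : a = b <;> simp_all [List.append_assoc]

theorem getD_buildAdj (edges : List (Int × Int)) (v : Int) :
    (buildAdj edges).getD v [] = nbrs edges v := by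
  have := getD_buildAdj_aux edges PySem.Dict.empty v
  simpa [buildAdj, PySem.Dict.getD_empty] using this

theorem scanNext_eq_find? (prev : Option Int) (vis : PySem.Set Int) (cur : Int)
    (es : List (Int × Int)) :
    scanNext prev vis cur es
      = (nbrs es cur).find? (fun n => decide (some n ≠ prev) && !(PySem.Set.contains vis n)) := by
  induction es with
  | nil => simp [scanNext, nbrs]
  | cons p rest ih =>
    obtain ⟨a, b⟩ := p
    have hn : nbrs ((a, b) :: rest) cur
        = ((if a = cur then [b] else []) ++ (if b = cur then [a] else [])) ++ nbrs rest cur := by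
      simp [nbrs]
    rw [scanNext, hn, List.find?_append, List.find?_append]
    by_cases ha : a = cur <;> by_cases hb : b = cur <;>
      simp [ha, hb, ih] <;> split_ifs <;> simp_all

theorem loop_eq (edges : List (Int × Int)) (start : Int) (fuel : Nat) :
    ∀ (cur prev : Option Int) (vis : PySem.Set Int) (border : List Int),
      loopA (buildAdj edges) start fuel cur prev vis border
        = loopB edges start fuel cur prev vis border := by
  induction fuel with
  | zero => intro cur prev vis border; cases cur <;> rfl
  | succ n ih =>
    intro cur prev vis border
    cases cur with
    | none => rfl
    | some c =>
      rw [loopA, loopB, scanNext_eq_find?, getD_buildAdj]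
      split_ifs with h
      · rfl
      · exact ih _ _ _ _

-- ===== VERDICT (by name: the statement is the Claim_ definition above) =====
theorem find_border_spec : Claim_equal_find_border := by
  intro edges _ _
  unfold Spec_find_border find_border find_border_alt
  exact loop_eq edges _ _ _ _ _ _
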